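-- pv_equiv track=rewrite | github.com/Goldenfreddy0703/plugin.audio.ytmusic.exp | resources/lib/utils.py | is_generic_thumbnail
-- ===== SOURCE A (Python) =====
-- def is_generic_thumbnail(url):
--     """
--     Check if thumbnail is a generic/low-quality YouTube thumbnail
--     that should be replaced with YouTube v3 API data
--     """
--     if not url:
--         return True
--
--     # These are generic/low-quality thumbnails from ytimg.com
--     generic_patterns = [
--         'oardefault.jpg',  # Generic channel thumbnail
--         'default.jpg',     # Very low quality
--         'mqdefault.jpg',   # Medium quality but still low
--         'hqdefault.jpg'    # High quality but not the best
--     ]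
--
--     return any(pattern in url for pattern in generic_patterns)
-- ===== SOURCE B (Python) =====
-- def is_generic_thumbnail(url):
--     """
--     Check if thumbnail is a generic/low-quality YouTube thumbnail
--     that should be replaced with YouTube v3 API data
--     """
--     return (not url) or ('default.jpg' in url)
-- ===== Notes on version B (the rewrite author's own statement) =====
-- stated objective: simpler
-- what changed: All four patterns end with 'default.jpg', so the four-way any() over a pattern list collapses to a single substring membership test, written as a one-line boolean expression with no list and no loop.
import Mathlib
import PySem

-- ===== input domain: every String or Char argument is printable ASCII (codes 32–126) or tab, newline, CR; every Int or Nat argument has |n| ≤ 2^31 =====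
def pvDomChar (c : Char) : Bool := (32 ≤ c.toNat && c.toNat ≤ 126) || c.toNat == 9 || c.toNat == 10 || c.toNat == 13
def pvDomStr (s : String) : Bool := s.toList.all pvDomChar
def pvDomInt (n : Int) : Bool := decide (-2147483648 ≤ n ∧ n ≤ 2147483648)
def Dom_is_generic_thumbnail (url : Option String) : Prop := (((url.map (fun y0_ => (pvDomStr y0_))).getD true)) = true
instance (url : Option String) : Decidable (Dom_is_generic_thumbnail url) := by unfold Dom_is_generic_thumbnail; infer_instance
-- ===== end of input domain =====

-- B replaces the four-pattern any() loop with a single 'default.jpg' substring test (objective: simpler).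

-- ===== PORT A =====
def is_generic_thumbnail (url : Option String) : Bool :=
  match url with
  | none => true
  | some s =>
    if s = "" then true
    else
      let generic_patterns := ["oardefault.jpg", "default.jpg", "mqdefault.jpg", "hqdefault.jpg"]
      generic_patterns.any (fun pattern => PySem.Str.isIn pattern s)

-- ===== PORT B =====
def is_generic_thumbnail_alt (url : Option String) : Bool :=
  match url with
  | none => true
  | some s => decide (s = "") || PySem.Str.isIn "default.jpg" s

-- ===== PRECONDITION & SPEC =====
def Spec_is_generic_thumbnail (url : Option String) (out : Bool) : Prop := out = is_generic_thumbnail_alt url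
instance (url : Option String) (out : Bool) : Decidable (Spec_is_generic_thumbnail url out) := by unfold Spec_is_generic_thumbnail; infer_instance

-- ===== CLAIM (what is proved, stated in full; the proofs are below) =====
def Claim_equal_is_generic_thumbnail : Prop := ∀ (url : Option String), Dom_is_generic_thumbnail url → Spec_is_generic_thumbnail url (is_generic_thumbnail url)

-- ===== LEMMAS AND PROOFS =====

-- Each of A's patterns contains B's single pattern as a suffix, so matching any pattern
-- implies matching "default.jpg"; the converse holds because "default.jpg" is one of the patterns.
theorem isIn_of_suffix_isIn {p q s : String} (h : q.toList <:+ p.toList)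
    (hp : PySem.Str.isIn p s = true) : PySem.Str.isIn q s = true := by
  rw [PySem.Str.isIn_iff_infix] at hp ⊢
  exact h.isInfix.trans hp

-- ===== VERDICT (by name: the statement is the Claim_ definition above) =====
theorem is_generic_thumbnail_spec : Claim_equal_is_generic_thumbnail := by
  unfold Claim_equal_is_generic_thumbnail Spec_is_generic_thumbnail
  intro url _
  match url with
  | none => rfl
  | some s =>
    simp only [is_generic_thumbnail, is_generic_thumbnail_alt, List.any_cons, List.any_nil,
      Bool.or_false]
    by_cases hs : s = ""
    · simp [hs]
    · simp only [hs, if_false, decide_false, Bool.false_or]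
      cases hd : PySem.Str.isIn "default.jpg" s with
      | true => simp [hd]
      | false =>
        simp only [hd, Bool.false_or, Bool.or_eq_false_iff]
        refine ⟨?_, ?_, ?_⟩
        · cases h : PySem.Str.isIn "oardefault.jpg" s
          · rfl
          · exact absurd (isIn_of_suffix_isIn (q := "default.jpg") (by decide) h) (by simpa using hd)
        · cases h : PySem.Str.isIn "mqdefault.jpg" s
          · rfl
          · exact absurd (isIn_of_suffix_isIn (q := "default.jpg") (by decide) h) (by simpa using hd)
        · cases h : PySem.Str.isIn "hqdefault.jpg" s
          · rfl
          · exact absurd (isIn_of_suffix_isIn (q := "default.jpg") (by decide) h) (by simpa using hd)
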